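-- pv_equiv track=rewrite | github.com/Ronco1998/NLP_MEMM | code/preprocessing.py | check_feature_f101
-- ===== SOURCE A (Python) =====
-- def check_feature_f101(cur_word, cur_tag):
--     known_suffixes = {
--         'ing': 'VBG',
--         'ed': 'VBD',
--         'ly': 'RB',
--         's': 'NNS',
--         'es': 'VBZ',
--         'ion': 'NN',
--         'ions': 'NNS',
--         'able': 'JJ',
--         'ible': 'JJ',
--         'ic': 'JJ',
--         'ical': 'JJ'
--     }
--     for suffix, tag in known_suffixes.items():
--         if cur_word.endswith(suffix) and cur_tag == tag:
--             return True
--     return False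
-- ===== SOURCE B (Python) =====
-- _TAG_SUFFIXES = {
--     'VBG': ('ing',),
--     'VBD': ('ed',),
--     'RB': ('ly',),
--     'NNS': ('s', 'ions'),
--     'VBZ': ('es',),
--     'NN': ('ion',),
--     'JJ': ('able', 'ible', 'ic', 'ical'),
-- }
--
-- def check_feature_f101(cur_word, cur_tag):
--     return cur_word.endswith(_TAG_SUFFIXES.get(cur_tag, ()))
-- ===== Notes on version B (the rewrite author's own statement) =====
-- stated objective: simpler
-- what changed: Inverted the suffix->tag scan into a tag->suffixes table: one dict lookup of cur_tag followed by a single endswith over that tag's suffix tuple, instead of scanning all eleven (suffix, tag) pairs and comparing the tag each time.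
import Mathlib
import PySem

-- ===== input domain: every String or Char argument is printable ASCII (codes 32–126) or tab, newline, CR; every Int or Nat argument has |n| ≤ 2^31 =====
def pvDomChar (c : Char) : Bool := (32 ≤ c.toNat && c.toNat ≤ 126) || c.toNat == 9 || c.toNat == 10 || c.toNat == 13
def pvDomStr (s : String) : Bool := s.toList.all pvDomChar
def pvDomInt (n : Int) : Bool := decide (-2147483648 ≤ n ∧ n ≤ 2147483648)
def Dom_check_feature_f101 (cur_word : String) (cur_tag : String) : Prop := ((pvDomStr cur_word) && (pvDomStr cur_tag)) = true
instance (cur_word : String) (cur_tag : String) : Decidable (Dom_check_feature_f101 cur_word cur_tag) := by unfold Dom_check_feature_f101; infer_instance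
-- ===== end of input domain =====

-- B inverts the suffix->tag scan into a tag->suffixes lookup followed by an endswith over that tag's suffixes (simpler control flow; return value unchanged).


-- ===== PORT A =====
-- the dict literal, as an association list in insertion order
def knownSuffixes : List (String × String) :=
  [("ing", "VBG"), ("ed", "VBD"), ("ly", "RB"), ("s", "NNS"), ("es", "VBZ"),
   ("ion", "NN"), ("ions", "NNS"), ("able", "JJ"), ("ible", "JJ"), ("ic", "JJ"), ("ical", "JJ")]

-- the for-loop with early return, as structural recursion over the items
def f101Loop (cur_word : String) (cur_tag : String) : List (String × String) → Bool
  | [] => false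
  | (suffix, tag) :: rest =>
      if PySem.Str.endswith cur_word suffix && cur_tag == tag then true
      else f101Loop cur_word cur_tag rest

def check_feature_f101 (cur_word : String) (cur_tag : String) : Bool :=
  f101Loop cur_word cur_tag knownSuffixes

-- ===== PORT B =====
def tagSuffixes : PySem.Dict String (List String) :=
  PySem.Dict.mk [("VBG", ["ing"]), ("VBD", ["ed"]), ("RB", ["ly"]), ("NNS", ["s", "ions"]),
   ("VBZ", ["es"]), ("NN", ["ion"]), ("JJ", ["able", "ible", "ic", "ical"])]

def check_feature_f101_alt (cur_word : String) (cur_tag : String) : Bool :=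
  (PySem.Dict.getD tagSuffixes cur_tag []).any (fun sfx => PySem.Str.endswith cur_word sfx)

-- ===== PRECONDITION & SPEC =====
def Spec_check_feature_f101 (cur_word : String) (cur_tag : String) (out : Bool) : Prop := out = check_feature_f101_alt cur_word cur_tag
instance (cur_word : String) (cur_tag : String) (out : Bool) : Decidable (Spec_check_feature_f101 cur_word cur_tag out) := by unfold Spec_check_feature_f101; infer_instance

-- ===== CLAIM (what is proved, stated in full; the proofs are below) =====
def Claim_equal_check_feature_f101 : Prop := ∀ (cur_word : String) (cur_tag : String), Dom_check_feature_f101 cur_word cur_tag → Spec_check_feature_f101 cur_word cur_tag (check_feature_f101 cur_word cur_tag)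

-- ===== LEMMAS AND PROOFS =====

-- ===== VERDICT (by name: the statement is the Claim_ definition above) =====
theorem check_feature_f101_spec : Claim_equal_check_feature_f101 := by
  intro w t _
  unfold Spec_check_feature_f101 check_feature_f101 check_feature_f101_alt
  by_cases h1 : t = "VBG" <;> by_cases h2 : t = "VBD" <;> by_cases h3 : t = "RB" <;>
    by_cases h4 : t = "NNS" <;> by_cases h5 : t = "VBZ" <;> by_cases h6 : t = "NN" <;>
    by_cases h7 : t = "JJ" <;>
  first
  | (subst t
     simp [f101Loop, knownSuffixes, tagSuffixes, PySem.Dict.getD, PySem.Dict.get?_mk_cons])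
  | (have g1 : ¬ (("VBG" : String) = t) := fun h => h1 h.symm
     have g2 : ¬ (("VBD" : String) = t) := fun h => h2 h.symm
     have g3 : ¬ (("RB" : String) = t) := fun h => h3 h.symm
     have g4 : ¬ (("NNS" : String) = t) := fun h => h4 h.symm
     have g5 : ¬ (("VBZ" : String) = t) := fun h => h5 h.symm
     have g6 : ¬ (("NN" : String) = t) := fun h => h6 h.symm
     have g7 : ¬ (("JJ" : String) = t) := fun h => h7 h.symm
     simp [f101Loop, knownSuffixes, tagSuffixes, PySem.Dict.getD, 
       h1, h2, h3, h4, h5, h6, h7, g1, g2, g3, g4, g5, g6, g7, PySem.Dict.get?])
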